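-- pv_equiv track=rewrite | github.com/M3TIOR/apt-user-sh | src/supplements/sync-control-file.py | dpkg_status_dumps
-- ===== SOURCE A (Python) =====
-- def dpkg_status_dumps(obj):
-- 	result="";
-- 	for entry in obj:
-- 		for key, value in entry:
-- 			s = value.split("\n")
-- 			result += f"{key}:{s[0]}\n"
-- 			for i in range(1, len(s)):
-- 				result += f" {s[i]}\n"
-- 		result += "\n"
--
-- 	return result
-- ===== SOURCE B (Python) =====
-- def dpkg_status_dumps(obj):
-- 	# Recursive over entries; each value is rewritten by one character-level
-- 	# pass (a '\n' -> '\n ' transducer) instead of splitting into lines.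
-- 	if not obj:
-- 		return ""
-- 	entry, rest = obj[0], obj[1:]
-- 	body = "".join(
-- 		k + ":" + "".join(c + " " if c == "\n" else c for c in v) + "\n"
-- 		for k, v in entry
-- 	)
-- 	return body + "\n" + dpkg_status_dumps(rest)
-- ===== Notes on version B (the rewrite author's own statement) =====
-- stated objective: alternative
-- what changed: B recurses over the entry list instead of A's fold with a growing string accumulator, and formats each value by a single character-level pass that rewrites '\n' to '\n ' (a transducer), eliminating A's split-into-lines and indexed loop over the split entirely.
import Mathlib
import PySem

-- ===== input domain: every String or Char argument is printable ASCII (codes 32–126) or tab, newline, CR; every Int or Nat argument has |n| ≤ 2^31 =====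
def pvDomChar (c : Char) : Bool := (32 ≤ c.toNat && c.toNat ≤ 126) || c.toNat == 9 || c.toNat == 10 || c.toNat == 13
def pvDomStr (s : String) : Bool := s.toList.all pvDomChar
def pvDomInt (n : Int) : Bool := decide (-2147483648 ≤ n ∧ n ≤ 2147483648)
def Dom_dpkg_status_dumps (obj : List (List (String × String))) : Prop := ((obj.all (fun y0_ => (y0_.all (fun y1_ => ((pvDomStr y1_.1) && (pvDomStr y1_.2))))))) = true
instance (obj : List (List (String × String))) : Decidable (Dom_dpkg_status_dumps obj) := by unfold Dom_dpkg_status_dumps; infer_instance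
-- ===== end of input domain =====

-- B is recursive over entries and replaces A's split-into-lines + indexed loop by a single
-- character-level pass over each value ('\n' -> '\n ' transducer): an alternative decomposition.

-- ===== PORT A =====
-- inner body of A's loop over (key, value): split, emit first line, then the indexed loop
def pvAStep (result : List Char) (kv : String × String) : List Char :=
  let s := PySem.Chars.splitOn kv.2.toList ['\n']
  let result := result ++ kv.1.toList ++ [':'] ++ PySem.List.pyGetD s 0 [] ++ ['\n']
  (PySem.List.pyRange 1 (s.length : Int) 1).foldl
    (fun r i => r ++ [' '] ++ PySem.List.pyGetD s i [] ++ ['\n']) result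

def dpkg_status_dumps (obj : List (List (String × String))) : String :=
  String.ofList (obj.foldl (fun result entry => (entry.foldl pvAStep result) ++ ['\n']) [])

-- ===== PORT B =====
-- "".join(c + " " if c == "\n" else c for c in v) : one char-level pass over the value
def pvEsc (c : Char) : List Char := if c = '\n' then [c, ' '] else [c]

-- k + ":" + <escaped value> + "\n"
def pvPairText (kv : String × String) : List Char :=
  kv.1.toList ++ [':'] ++ kv.2.toList.flatMap pvEsc ++ ['\n']

-- the recursion over entries: body + "\n" + dpkg_status_dumps(rest)
def pvAltGo : List (List (String × String)) → List Char
  | [] => []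
  | entry :: rest => PySem.Chars.join [] (entry.map pvPairText) ++ ['\n'] ++ pvAltGo rest

def dpkg_status_dumps_alt (obj : List (List (String × String))) : String :=
  String.ofList (pvAltGo obj)

-- ===== PRECONDITION & SPEC =====
def Spec_dpkg_status_dumps (obj : List (List (String × String))) (out : String) : Prop := out = dpkg_status_dumps_alt obj
instance (obj : List (List (String × String))) (out : String) : Decidable (Spec_dpkg_status_dumps obj out) := by unfold Spec_dpkg_status_dumps; infer_instance

-- ===== CLAIM =====
def Claim_equal_dpkg_status_dumps : Prop := ∀ (obj : List (List (String × String))), Dom_dpkg_status_dumps obj → Spec_dpkg_status_dumps obj (dpkg_status_dumps obj)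

-- ===== LEMMAS AND PROOFS =====

-- fuel-free reformulation of PySem.Chars.splitOn.go at sep = ['\n'] (proof helper only)
def pvSgo : List Char → List Char → List (List Char) → List (List Char)
  | [], cur, acc => (cur.reverse :: acc).reverse
  | c :: rest, cur, acc =>
      if c = '\n' then pvSgo rest [] (cur.reverse :: acc) else pvSgo rest (c :: cur) acc

theorem pvGo_eq_sgo (l : List Char) : ∀ (fuel : Nat) (cur : List Char)
    (acc : List (List Char)), l.length ≤ fuel →
    PySem.Chars.splitOn.go ['\n'] fuel l cur acc = pvSgo l cur acc := by
  induction l with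
  | nil =>
    intro fuel cur acc _
    cases fuel <;> simp [PySem.Chars.splitOn.go, pvSgo]
  | cons c rest ih =>
    intro fuel cur acc h
    cases fuel with
    | zero => simp at h
    | succ n =>
      unfold PySem.Chars.splitOn.go pvSgo
      by_cases hc : c = '\n'
      · subst hc
        rw [if_pos (by simp [List.isPrefixOf]), if_pos rfl]
        simp only [List.length_singleton, List.drop_succ_cons, List.drop_zero]
        exact ih n [] (cur.reverse :: acc) (by simpa using Nat.lt_succ_iff.mp (by simpa using h))
      · rw [if_neg (by simp [List.isPrefixOf, Ne.symm hc]), if_neg hc]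
        exact ih n (c :: cur) acc (by simpa using Nat.lt_succ_iff.mp (by simpa using h))

-- appending an extra last piece to a nonempty join
theorem pvJoin_append_last (s b : List Char) (xs : List (List Char)) (h : xs ≠ []) :
    PySem.Chars.join s (xs ++ [b]) = PySem.Chars.join s xs ++ s ++ b := by
  induction xs with
  | nil => exact absurd rfl h
  | cons a xs ih =>
    cases xs with
    | nil => simp [PySem.Chars.join_cons_cons, PySem.Chars.join_singleton]
    | cons a' xs' =>
      simp only [List.cons_append]
      rw [PySem.Chars.join_cons_cons, PySem.Chars.join_cons_cons]
      rw [show a' :: (xs' ++ [b]) = (a' :: xs') ++ [b] from rfl, ih (by simp)]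
      simp

-- extending the last piece of a join
theorem pvJoin_last_extend (s : List Char) (xs : List (List Char)) (y z : List Char) :
    PySem.Chars.join s (xs ++ [y ++ z]) = PySem.Chars.join s (xs ++ [y]) ++ z := by
  cases xs with
  | nil => simp [PySem.Chars.join_singleton]
  | cons a xs =>
    rw [pvJoin_append_last s (y ++ z) (a :: xs) (by simp),
        pvJoin_append_last s y (a :: xs) (by simp)]
    simp

-- the "\n "-join of the splitter's result is the character-level escape
theorem pvSgoJoin (l : List Char) : ∀ (cur : List Char) (acc : List (List Char)),
    PySem.Chars.join ['\n', ' '] (pvSgo l cur acc)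
      = PySem.Chars.join ['\n', ' '] (acc.reverse ++ [cur.reverse]) ++ l.flatMap pvEsc := by
  induction l with
  | nil => intro cur acc; simp [pvSgo]
  | cons c rest ih =>
    intro cur acc
    unfold pvSgo
    by_cases hc : c = '\n'
    · subst hc
      rw [if_pos rfl, ih [] (cur.reverse :: acc)]
      simp only [List.reverse_cons, List.reverse_nil, List.flatMap_cons, pvEsc]
      rw [List.append_assoc _ [List.reverse cur] [[]],
        ← List.singleton_append, ← List.append_assoc,
        pvJoin_append_last _ [] _ (by simp)]
      simp
    · rw [if_neg hc, ih (c :: cur) acc]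
      simp only [List.reverse_cons, List.flatMap_cons, pvEsc, if_neg hc]
      rw [pvJoin_last_extend]
      simp

theorem pvEsc_eq (cs : List Char) :
    PySem.Chars.join ['\n', ' '] (PySem.Chars.splitOn cs ['\n']) = cs.flatMap pvEsc := by
  unfold PySem.Chars.splitOn
  rw [pvGo_eq_sgo cs (cs.length + 1) [] [] (by omega), pvSgoJoin]
  simp [PySem.Chars.join_singleton]

-- A's per-pair output in join-over-split form (proof helper)
def pvPairJoin (kv : String × String) : List Char :=
  kv.1.toList ++ [':'] ++ PySem.Chars.join ['\n', ' '] (PySem.Chars.splitOn kv.2.toList ['\n']) ++ ['\n']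

theorem pvPairJoin_eq (kv : String × String) : pvPairJoin kv = pvPairText kv := by
  unfold pvPairJoin pvPairText
  rw [pvEsc_eq]

-- splitOn's worker never returns the empty list
theorem pvSplitOnGo_ne_nil (sep : List Char) (fuel : Nat) (l cur : List Char)
    (acc : List (List Char)) : PySem.Chars.splitOn.go sep fuel l cur acc ≠ [] := by
  induction fuel generalizing l cur acc with
  | zero => unfold PySem.Chars.splitOn.go; simp
  | succ n ih =>
    unfold PySem.Chars.splitOn.go
    cases l with
    | nil => simp
    | cons c rest =>
      simp only
      split
      · exact ih _ _ _
      · exact ih _ _ _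

theorem pvSplitOn_ne_nil (cs sep : List Char) : PySem.Chars.splitOn cs sep ≠ [] := by
  unfold PySem.Chars.splitOn; exact pvSplitOnGo_ne_nil _ _ _ _ _

-- "".join prepends its head
theorem pvJoinNil_cons (p : List Char) (rest : List (List Char)) :
    PySem.Chars.join [] (p :: rest) = p ++ PySem.Chars.join [] rest := by
  cases rest with
  | nil => simp [PySem.Chars.join_singleton, PySem.Chars.join_nil]
  | cons q r => rw [PySem.Chars.join_cons_cons]; simp

-- A's continuation-line loop over the tail equals the "\n ".join of the whole split
theorem pvTailFold (t : List (List Char)) (h res : List Char) :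
    t.foldl (fun r x => r ++ [' '] ++ x ++ ['\n']) (res ++ h ++ ['\n'])
      = res ++ PySem.Chars.join ['\n', ' '] (h :: t) ++ ['\n'] := by
  induction t generalizing h res with
  | nil => simp [PySem.Chars.join_singleton]
  | cons x t ih =>
    rw [PySem.Chars.join_cons_cons]
    simp only [List.foldl_cons]
    have : res ++ h ++ ['\n'] ++ [' '] ++ x ++ ['\n']
        = (res ++ h ++ ['\n', ' ']) ++ x ++ ['\n'] := by simp
    rw [this, ih x (res ++ h ++ ['\n', ' '])]
    simp

-- one (key, value) pair: A's step appends exactly B's pair text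
theorem pvAStep_eq (res : List Char) (kv : String × String) :
    pvAStep res kv = res ++ pvPairText kv := by
  rw [← pvPairJoin_eq]
  unfold pvAStep pvPairJoin
  rcases hs : PySem.Chars.splitOn kv.2.toList ['\n'] with _ | ⟨h, t⟩
  · exact absurd hs (pvSplitOn_ne_nil _ _)
  · rw [PySem.List.foldl_pyRange_pyGetD' (h :: t) [] (fun r x => r ++ [' '] ++ x ++ ['\n'])
      _ (by norm_num : (0:Int) ≤ 1)]
    simp only [PySem.List.pyGetD_zero_cons, Int.toNat_one, List.drop_succ_cons, List.drop_zero]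
    have := pvTailFold t h (res ++ kv.1.toList ++ [':'])
    simp only [List.append_assoc] at this ⊢
    exact this

-- one entry: A's inner foldl appends "".join of the entry's pair texts
theorem pvEntryFold (entry : List (String × String)) (res : List Char) :
    entry.foldl pvAStep res = res ++ PySem.Chars.join [] (entry.map pvPairText) := by
  induction entry generalizing res with
  | nil => simp [PySem.Chars.join_nil]
  | cons kv rest ih =>
    simp only [List.foldl_cons, List.map_cons, pvJoinNil_cons, pvAStep_eq, ih]
    simp only [List.append_assoc]

-- the outer loop of A equals B's recursion over entries
theorem pvOuterFold (obj : List (List (String × String))) (res : List Char) :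
    obj.foldl (fun result entry => (entry.foldl pvAStep result) ++ ['\n']) res
      = res ++ pvAltGo obj := by
  induction obj generalizing res with
  | nil => simp [pvAltGo]
  | cons e rest ih =>
    rw [List.foldl_cons, ih (e.foldl pvAStep res ++ ['\n']), pvEntryFold,
      show pvAltGo (e :: rest)
        = PySem.Chars.join [] (e.map pvPairText) ++ ['\n'] ++ pvAltGo rest from rfl]
    simp only [List.append_assoc]

-- ===== VERDICT =====
theorem dpkg_status_dumps_spec : Claim_equal_dpkg_status_dumps := by
  intro obj _
  unfold Spec_dpkg_status_dumps dpkg_status_dumps dpkg_status_dumps_alt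
  rw [pvOuterFold]
  simp
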